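-- pv_equiv track=rewrite | github.com/3bodymo/lamport-vector-clocks | main.py | isLetterEqual
-- ===== SOURCE A (Python) =====
-- ALPHABET = ['a', 'b', 'c', 'd', 'e', 'f', 'g', 'h', 'i', 'j', 'k', 'l', 'm', 'n', 'o', 'p', 'q', 'r', 's', 't', 'u', 'v', 'w', 'x', 'y', 'z']
--
-- def isLetterEqual(letter, currentLetter):
--     letterLocation = 0
--     currentLetterLocation = 0
--     for i in range(len(ALPHABET)):
--         if(ALPHABET[i] == letter):
--             letterLocation = i
--         if(ALPHABET[i] == currentLetter):
--             currentLetterLocation = i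
--     if(letterLocation == currentLetterLocation):
--         return True
--     if(letterLocation != currentLetterLocation):
--         return False
-- ===== SOURCE B (Python) =====
-- def isLetterEqual(letter, currentLetter):
--     # Simpler: closed-form alphabet position (ord arithmetic) instead of scanning ALPHABET;
--     # anything that is not a single lowercase letter gets position 0, as in the original.
--     def pos(x):
--         if isinstance(x, str) and len(x) == 1 and 'a' <= x <= 'z':
--             return ord(x) - ord('a')
--         return 0
--     return pos(letter) == pos(currentLetter)
-- ===== Notes on version B (the rewrite author's own statement) =====
-- stated objective: simpler
-- what changed: Replaces the 26-step scan over ALPHABET that tracks last-match indices with a closed-form position pos(x) = ord(x) - ord('a') guarded by a single-lowercase-letter check (non-letters default to 0, as in A).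
import Mathlib
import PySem

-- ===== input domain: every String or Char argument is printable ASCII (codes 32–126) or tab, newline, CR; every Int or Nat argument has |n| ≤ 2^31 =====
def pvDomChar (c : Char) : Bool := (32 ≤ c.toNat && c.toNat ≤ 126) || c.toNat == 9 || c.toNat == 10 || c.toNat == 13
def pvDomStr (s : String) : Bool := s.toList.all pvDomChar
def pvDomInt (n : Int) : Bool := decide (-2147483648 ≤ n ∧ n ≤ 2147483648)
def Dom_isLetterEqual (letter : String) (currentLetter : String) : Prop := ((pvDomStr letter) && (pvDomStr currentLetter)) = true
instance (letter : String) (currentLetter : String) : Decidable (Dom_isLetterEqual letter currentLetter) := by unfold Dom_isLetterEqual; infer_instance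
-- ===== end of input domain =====

-- ===== PORT A =====
-- B replaces A's 26-step last-match scan over ALPHABET with a closed-form ord-arithmetic position (simpler).
def ALPHABET : List String := ["a","b","c","d","e","f","g","h","i","j","k","l","m","n","o","p","q","r","s","t","u","v","w","x","y","z"]

def isLetterEqual (letter : String) (currentLetter : String) : Bool :=
  -- for i in range(len(ALPHABET)): two last-match indices updated in order; then True/False on equality
  let r := (List.range ALPHABET.length).foldl
    (fun (st : Int × Int) (i : Nat) =>
      let st1 := if ALPHABET[i]! == letter then ((i : Int), st.2) else st
      if ALPHABET[i]! == currentLetter then (st1.1, (i : Int)) else st1)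
    (0, 0)
  if r.1 == r.2 then true else false

-- ===== PORT B =====
-- pos(x): ord(x) - ord('a') for a single lowercase letter, else 0.  Python's "len(x) == 1 and
-- 'a' <= x <= 'z'" on a single-character string is exactly the character comparison used here.
def pvPos (x : String) : Int :=
  match x.toList with
  | [c] => if 'a' ≤ c ∧ c ≤ 'z' then (c.toNat : Int) - 97 else 0
  | _ => 0

def isLetterEqual_alt (letter : String) (currentLetter : String) : Bool :=
  pvPos letter == pvPos currentLetter

-- ===== PRECONDITION & SPEC =====
def Spec_isLetterEqual (letter : String) (currentLetter : String) (out : Bool) : Prop := out = isLetterEqual_alt letter currentLetter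
instance (letter : String) (currentLetter : String) (out : Bool) : Decidable (Spec_isLetterEqual letter currentLetter out) := by unfold Spec_isLetterEqual; infer_instance

-- ===== CLAIM (what is proved, stated in full; the proofs are below) =====
def Claim_equal_isLetterEqual : Prop := ∀ (letter : String) (currentLetter : String), Dom_isLetterEqual letter currentLetter → Spec_isLetterEqual letter currentLetter (isLetterEqual letter currentLetter)

-- ===== LEMMAS AND PROOFS =====
-- one component of A's loop: the last index i with ALPHABET[i] == s (0 if none)
def scanPos (s : String) : Int :=
  (List.range ALPHABET.length).foldl (fun (acc : Int) (i : Nat) => if ALPHABET[i]! == s then (i : Int) else acc) 0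

lemma foldl_pair (letter currentLetter : String) (l : List Nat) (a b : Int) :
    l.foldl (fun (st : Int × Int) (i : Nat) =>
      let st1 := if ALPHABET[i]! == letter then ((i : Int), st.2) else st
      if ALPHABET[i]! == currentLetter then (st1.1, (i : Int)) else st1) (a, b)
    = (l.foldl (fun (acc : Int) (i : Nat) => if ALPHABET[i]! == letter then (i : Int) else acc) a,
       l.foldl (fun (acc : Int) (i : Nat) => if ALPHABET[i]! == currentLetter then (i : Int) else acc) b) := by
  induction l generalizing a b with
  | nil => rfl
  | cons i t ih =>
    simp only [List.foldl_cons]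
    rw [← ih]
    congr 1
    dsimp only
    split_ifs <;> rfl

lemma scan_notmem (s : String) (h : s ∉ ALPHABET) : scanPos s = 0 := by
  have aux : ∀ (l : List Nat), (∀ i ∈ l, i < ALPHABET.length) → ∀ (a : Int),
      l.foldl (fun (acc : Int) (i : Nat) => if ALPHABET[i]! == s then (i : Int) else acc) a = a := by
    intro l
    induction l with
    | nil => intro _ a; rfl
    | cons i t ih =>
      intro hl a
      have hi : i < ALPHABET.length := hl i (by simp)
      have hne : (ALPHABET[i]! == s) = false := by
        rw [beq_eq_false_iff_ne]
        intro he
        exact h (he ▸ (by rw [List.getElem!_eq_getElem?_getD, List.getElem?_eq_getElem hi]; exact List.getElem_mem hi))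
      simp only [List.foldl_cons, hne, Bool.false_eq_true, if_false]
      exact ih (fun j hj => hl j (by simp [hj])) a
  exact aux _ (fun i hi => (List.mem_range.mp hi)) 0

lemma mem_alpha_shape : ∀ s ∈ ALPHABET, ∃ c, s.toList = [c] ∧ 'a' ≤ c ∧ c ≤ 'z' := by
  intro s hs
  fin_cases hs <;> exact ⟨_, rfl, by decide, by decide⟩

lemma scan_eq (s : String) : scanPos s = pvPos s := by
  have hs : s = String.ofList s.toList := by simp
  rw [hs]
  generalize s.toList = l
  match l with
  | [] =>
    rw [scan_notmem _ (by decide)]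
    rfl
  | c :: d :: t =>
    rw [scan_notmem]
    · simp [pvPos]
    · intro hmem
      obtain ⟨e, he, -⟩ := mem_alpha_shape _ hmem
      rw [String.toList_ofList] at he
      simp at he
  | [c] =>
    by_cases hlo : 'a' ≤ c ∧ c ≤ 'z'
    · have h1 : 97 ≤ c.toNat := hlo.1
      have h2 : c.toNat ≤ 122 := hlo.2
      interval_cases h : c.toNat <;>
        (rw [← Char.ofNat_toNat c, h]; decide)
    · rw [scan_notmem]
      · simp [pvPos, hlo]
      · intro hmem
        obtain ⟨e, he, hb⟩ := mem_alpha_shape _ hmem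
        rw [String.toList_ofList] at he
        obtain rfl : c = e := by simpa using he
        exact hlo hb

-- ===== VERDICT (by name: the statement is the Claim_ definition above) =====
theorem isLetterEqual_spec : Claim_equal_isLetterEqual := by
  intro letter currentLetter _
  unfold Spec_isLetterEqual isLetterEqual isLetterEqual_alt
  rw [foldl_pair]
  have hl : scanPos letter = pvPos letter := scan_eq letter
  have hc : scanPos currentLetter = pvPos currentLetter := scan_eq currentLetter
  unfold scanPos at hl hc
  rw [hl, hc]
  by_cases h : (pvPos letter == pvPos currentLetter) = true <;> simp [h]
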